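-- pv_equiv track=rewrite | github.com/kaluginpeter/Algorithms_and_structures_tasks | Python_Solutions/CodeWars/7kyu/Case_sensitive.py | case_sensitive
-- ===== SOURCE A (Python) =====
-- def case_sensitive(s):
--     flag: bool = True
--     ans: list = list()
--     for i in s:
--         if i.isupper():
--             flag = not flag
--             ans += i
--     return [flag, ans]
-- ===== SOURCE B (Python) =====
-- def case_sensitive(s):
--     # Divide and conquer: the answer of a string is the combination of the
--     # answers of its two halves (flags combine as parity equality,
--     # uppercase lists concatenate).
--     def go(lo, hi):
--         if hi - lo == 0:
--             return True, []
--         if hi - lo == 1: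
--             c = s[lo]
--             if c.isupper():
--                 return False, [c]
--             return True, []
--         mid = (lo + hi) // 2
--         f1, a1 = go(lo, mid)
--         f2, a2 = go(mid, hi)
--         return f1 == f2, a1 + a2
--     f, a = go(0, len(s))
--     return [f, a]
-- ===== Notes on version B (the rewrite author's own statement) =====
-- stated objective: alternative
-- what changed: Replaces A's left-to-right scan with a mutating toggle flag by a divide-and-conquer recursion: each half is solved independently and the results are combined (flags by parity equality, uppercase lists by concatenation), with no running state at all.
import Mathlib
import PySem

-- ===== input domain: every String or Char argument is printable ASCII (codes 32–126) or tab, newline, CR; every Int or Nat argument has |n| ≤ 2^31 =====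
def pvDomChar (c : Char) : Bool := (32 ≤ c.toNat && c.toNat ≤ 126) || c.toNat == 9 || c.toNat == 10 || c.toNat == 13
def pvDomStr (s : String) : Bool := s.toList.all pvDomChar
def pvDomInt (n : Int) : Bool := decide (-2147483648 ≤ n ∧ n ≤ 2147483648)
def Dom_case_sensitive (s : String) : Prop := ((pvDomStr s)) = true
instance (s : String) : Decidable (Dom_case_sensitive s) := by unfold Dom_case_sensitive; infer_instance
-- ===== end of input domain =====

-- B replaces A's stateful left-to-right toggle scan by a divide-and-conquer recursion
-- that solves each half independently and combines the results (objective: alternative).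

-- ===== PORT A =====
-- running toggle: flag flips and the letter is appended for each uppercase char
def case_sensitive (s : String) : Bool × List String :=
  s.toList.foldl
    (fun (st : Bool × List String) i =>
      if PySem.Chars.isupper i then (!st.1, st.2 ++ [String.ofList [i]]) else st)
    (true, [])

-- ===== PORT B =====
-- go(lo, hi) of Source B operates on the slice s[lo:hi]; ported as recursion on that sublist,
-- splitting at mid = length / 2 exactly as Source B does.
def csGo : List Char → Bool × List String
  | [] => (true, [])
  | [c] => if PySem.Chars.isupper c then (false, [String.ofList [c]]) else (true, [])
  | c1 :: c2 :: rest =>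
    let l := c1 :: c2 :: rest
    let mid := l.length / 2
    let r1 := csGo (l.take mid)
    let r2 := csGo (l.drop mid)
    (r1.1 == r2.1, r1.2 ++ r2.2)
  termination_by l => l.length
  decreasing_by
    · simp [List.length_take]; omega
    · simp [List.length_drop]; omega

def case_sensitive_alt (s : String) : Bool × List String :=
  csGo s.toList

-- ===== PRECONDITION & SPEC =====
def Spec_case_sensitive (s : String) (out : Bool × List String) : Prop := out = case_sensitive_alt s
instance (s : String) (out : Bool × List String) : Decidable (Spec_case_sensitive s out) := by unfold Spec_case_sensitive; infer_instance

-- ===== CLAIM (what is proved, stated in full; the proofs are below) =====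
def Claim_equal_case_sensitive : Prop := ∀ (s : String), Dom_case_sensitive s → Spec_case_sensitive s (case_sensitive s)

-- ===== LEMMAS AND PROOFS =====

-- closed form of A's fold
theorem case_sensitive_foldl
    (l : List Char) (flag : Bool) (ans : List String) :
    l.foldl
      (fun (st : Bool × List String) i =>
        if PySem.Chars.isupper i then (!st.1, st.2 ++ [String.ofList [i]]) else st)
      (flag, ans)
    = ((flag == (((l.filter PySem.Chars.isupper).length % 2) == 0)),
       ans ++ (l.filter PySem.Chars.isupper).map (fun c => String.ofList [c])) := by
  induction l generalizing flag ans with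
  | nil => simp
  | cons c l ih =>
    by_cases hc : PySem.Chars.isupper c = true
    · simp only [List.foldl_cons, hc, if_pos, List.filter_cons_of_pos hc, List.map_cons,
        List.length_cons, ih]
      refine Prod.ext ?_ (by simp)
      rcases Nat.mod_two_eq_zero_or_one (List.filter PySem.Chars.isupper l).length with h | h <;>
        rcases flag with _ | _ <;> simp [Nat.add_mod, h]
    · simp [List.foldl_cons, hc, List.filter_cons_of_neg, ih]

theorem parity_combine (a b : Nat) :
    ((a % 2 == 0) == (b % 2 == 0)) = ((a + b) % 2 == 0) := by
  rcases Nat.mod_two_eq_zero_or_one a with h1 | h1 <;>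
    rcases Nat.mod_two_eq_zero_or_one b with h2 | h2 <;> simp [Nat.add_mod, h1, h2]

-- closed form of B's divide and conquer
theorem csGo_closed (l : List Char) :
    csGo l = ((((l.filter PySem.Chars.isupper).length % 2) == 0),
              (l.filter PySem.Chars.isupper).map (fun c => String.ofList [c])) := by
  induction l using csGo.induct with
  | case1 => simp [csGo]
  | case2 c hc => simp [csGo, hc, List.filter_cons_of_pos]
  | case3 c hc => simp [csGo, hc, List.filter_cons_of_neg]
  | case4 c1 c2 rest l mid ihT ihD =>
    rw [csGo]
    rw [ihT, ihD]
    simp only [l, mid, List.length_cons]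
    have hsplit : (c1 :: c2 :: rest).filter PySem.Chars.isupper
        = ((c1 :: c2 :: rest).take ((rest.length + 1 + 1) / 2)).filter PySem.Chars.isupper
          ++ ((c1 :: c2 :: rest).drop ((rest.length + 1 + 1) / 2)).filter PySem.Chars.isupper := by
      rw [← List.filter_append, List.take_append_drop]
    refine Prod.ext ?_ ?_
    · show ((_ % 2 == 0) == (_ % 2 == 0)) = _
      rw [hsplit, List.length_append, parity_combine]
    · show _ ++ _ = _
      rw [hsplit, List.map_append]

-- ===== VERDICT (by name: the statement is the Claim_ definition above) =====
theorem case_sensitive_spec : Claim_equal_case_sensitive := by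
  intro s _
  unfold Spec_case_sensitive case_sensitive case_sensitive_alt
  rw [case_sensitive_foldl, csGo_closed]
  simp
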